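-- pv_equiv track=rewrite | github.com/kentblock/CSES-problems | searching_sorting/apartments/apartments.py | apartments
-- ===== SOURCE A (Python) =====
-- def apartments(k, desired_sizes, sizes):
--     desired_sizes.sort()
--     sizes.sort()
--     i, j = 0, 0
--     num_housed = 0
--     while i < len(desired_sizes) and j < len(sizes):
--         if abs(sizes[j] - desired_sizes[i]) <= k:
--             num_housed += 1
--             i += 1
--             j += 1
--         elif sizes[j] < desired_sizes[i]:
--             j += 1
--         else:
--             i += 1
--     return num_housed
-- ===== SOURCE B (Python) =====
-- def apartments(k, desired_sizes, sizes):
--     desired_sizes.sort()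
--     sizes.sort()
--     n = len(sizes)
--     j = 0
--     num_housed = 0
--     for d in desired_sizes:
--         # lower_bound: first index in [j, n) with sizes[idx] >= d - k, by binary search
--         lo, hi = j, n
--         while lo < hi:
--             mid = (lo + hi) // 2
--             if sizes[mid] < d - k:
--                 lo = mid + 1
--             else:
--                 hi = mid
--         j = lo
--         if j < n and sizes[j] <= d + k:
--             num_housed += 1
--             j += 1
--     return num_housed
-- ===== Notes on version B (the rewrite author's own statement) =====
-- stated objective: alternative
-- what changed: Instead of A's flat interleaved two-pointer while over both lists, B loops over sorted applicants and locates each applicant's first acceptable apartment with a hand-written lower-bound binary search over the sorted sizes (restarted from the consumed prefix), replacing A's element-by-element advancing of j with logarithmic jumps.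
import Mathlib
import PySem

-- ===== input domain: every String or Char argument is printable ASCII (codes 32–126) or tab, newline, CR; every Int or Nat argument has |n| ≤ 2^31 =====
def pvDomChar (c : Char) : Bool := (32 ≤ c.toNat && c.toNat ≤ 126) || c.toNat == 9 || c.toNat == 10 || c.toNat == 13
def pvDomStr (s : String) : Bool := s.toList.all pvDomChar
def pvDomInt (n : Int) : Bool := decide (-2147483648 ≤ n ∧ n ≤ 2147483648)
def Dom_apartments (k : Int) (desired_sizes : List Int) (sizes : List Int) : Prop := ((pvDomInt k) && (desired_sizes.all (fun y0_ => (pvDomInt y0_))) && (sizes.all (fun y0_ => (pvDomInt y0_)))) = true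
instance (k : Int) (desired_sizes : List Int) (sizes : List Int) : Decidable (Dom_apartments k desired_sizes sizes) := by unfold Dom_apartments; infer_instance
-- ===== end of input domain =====

-- B replaces A's flat interleaved two-pointer while by an outer loop over sorted applicants that
-- finds each applicant's first acceptable apartment with a hand-written lower-bound binary search.
-- Both A and B sort both argument lists in place; the equivalence proved is about the return value.

-- ===== PORT A =====
-- A's while loop over indices i (into desired) and j (into sizes); list indexing is guarded by
-- the loop condition, so getD is exact here.
def aLoop (k : Int) (ds ss : List Int) (i j : Nat) (housed : Int) : Int :=
  if h : i < ds.length ∧ j < ss.length then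
    if |ss.getD j 0 - ds.getD i 0| ≤ k then aLoop k ds ss (i + 1) (j + 1) (housed + 1)
    else if ss.getD j 0 < ds.getD i 0 then aLoop k ds ss i (j + 1) housed
    else aLoop k ds ss (i + 1) j housed
  else housed
termination_by (ds.length - i) + (ss.length - j)
decreasing_by all_goals omega

def apartments (k : Int) (desired_sizes : List Int) (sizes : List Int) : Int :=
  aLoop k (PySem.List.sorted desired_sizes (fun x => x) false)
         (PySem.List.sorted sizes (fun x => x) false) 0 0 0

-- ===== PORT B =====
-- B's inner binary search: first index in [lo, hi) with ss[idx] >= d - k (or hi); indices stay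
-- within [0, ss.length) while lo < hi, so getD is exact here.
def bis (k d : Int) (ss : List Int) (lo hi : Nat) : Nat :=
  if lo < hi then
    let mid := (lo + hi) / 2
    if ss.getD mid 0 < d - k then bis k d ss (mid + 1) hi else bis k d ss lo mid
  else lo
termination_by hi - lo
decreasing_by all_goals omega

-- B's outer for-loop over the sorted applicants (n = len(sizes); j is the consumed prefix)
def bLoop (k : Int) (ss : List Int) (ds : List Int) (j : Nat) (housed : Int) : Int :=
  match ds with
  | [] => housed
  | d :: rest =>
      let j' := bis k d ss j ss.length
      if j' < ss.length then
        if ss.getD j' 0 ≤ d + k then bLoop k ss rest (j' + 1) (housed + 1)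
        else bLoop k ss rest j' housed
      else bLoop k ss rest j' housed

def apartments_alt (k : Int) (desired_sizes : List Int) (sizes : List Int) : Int :=
  bLoop k (PySem.List.sorted sizes (fun x => x) false)
          (PySem.List.sorted desired_sizes (fun x => x) false) 0 0

-- ===== PRECONDITION & SPEC =====
def Spec_apartments (k : Int) (desired_sizes : List Int) (sizes : List Int) (out : Int) : Prop := out = apartments_alt k desired_sizes sizes
instance (k : Int) (desired_sizes : List Int) (sizes : List Int) (out : Int) : Decidable (Spec_apartments k desired_sizes sizes out) := by unfold Spec_apartments; infer_instance

-- ===== CLAIM (what is proved, stated in full; the proofs are below) =====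
def Claim_equal_apartments : Prop := ∀ (k : Int) (desired_sizes : List Int) (sizes : List Int), Dom_apartments k desired_sizes sizes → Spec_apartments k desired_sizes sizes (apartments k desired_sizes sizes)

-- ===== LEMMAS AND PROOFS =====

-- Proof-only linear skip: the first index ≥ j with ss[idx] ≥ d - k (or ss.length); the binary
-- search equals it on a sorted list, and it is what A's middle branch performs step by step.
def lSkip (k d : Int) (ss : List Int) (j : Nat) : Nat :=
  if h : j < ss.length ∧ ss.getD j 0 < d - k then lSkip k d ss (j + 1) else j
termination_by ss.length - j
decreasing_by omega

lemma lSkip_ge (k d : Int) (ss : List Int) (j : Nat) : j ≤ lSkip k d ss j := by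
  rw [lSkip]
  split
  · exact le_trans (Nat.le_succ j) (lSkip_ge k d ss (j + 1))
  · exact le_refl j
termination_by ss.length - j
decreasing_by omega

lemma lSkip_le (k d : Int) (ss : List Int) (j : Nat) (hj : j ≤ ss.length) :
    lSkip k d ss j ≤ ss.length := by
  rw [lSkip]
  split
  · next h => exact lSkip_le k d ss (j + 1) h.1
  · exact hj
termination_by ss.length - j
decreasing_by omega

lemma lSkip_stop (k d : Int) (ss : List Int) (j : Nat)
    (h : lSkip k d ss j < ss.length) : d - k ≤ ss.getD (lSkip k d ss j) 0 := by
  rw [lSkip]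
  split
  · next hc => exact lSkip_stop k d ss (j + 1) (by rwa [lSkip, dif_pos hc] at h)
  · next hc =>
    rw [lSkip, dif_neg hc] at h
    by_contra hlt
    exact hc ⟨h, by omega⟩
termination_by ss.length - j
decreasing_by omega

-- lSkip jumps over any block of indices that are all below d - k
lemma lSkip_advance (k d : Int) (ss : List Int) (j j2 : Nat) (hle : j ≤ j2)
    (hblk : ∀ m, j ≤ m → m < j2 → m < ss.length ∧ ss.getD m 0 < d - k) :
    lSkip k d ss j = lSkip k d ss j2 := by
  rcases Nat.eq_or_lt_of_le hle with heq | hlt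
  · rw [heq]
  · have hm := hblk j (le_refl j) hlt
    rw [lSkip, dif_pos hm]
    exact lSkip_advance k d ss (j + 1) j2 hlt (fun m h1 h2 => hblk m (by omega) h2)
termination_by j2 - j
decreasing_by omega

-- on a sorted list the binary search computes exactly the linear skip
lemma bis_eq_lSkip (k d : Int) (ss : List Int)
    (hmono : ∀ p q : Nat, p ≤ q → q < ss.length → ss.getD p 0 ≤ ss.getD q 0) :
    ∀ lo hi, lo ≤ hi → hi ≤ ss.length → (hi < ss.length → d - k ≤ ss.getD hi 0) →
      bis k d ss lo hi = lSkip k d ss lo := by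
  intro lo hi
  induction hn : hi - lo using Nat.strong_induction_on generalizing lo hi with
  | _ n ih =>
    intro hlohi hhile hbound
    rw [bis]
    by_cases hlt : lo < hi
    · rw [if_pos hlt]
      set mid := (lo + hi) / 2 with hmid
      have hmlo : lo ≤ mid := by omega
      have hmhi : mid < hi := by omega
      by_cases hc : ss.getD mid 0 < d - k
      · rw [if_pos hc]
        have := ih (hi - (mid + 1)) (by omega) (mid + 1) hi rfl (by omega) hhile hbound
        rw [this]
        refine (lSkip_advance k d ss lo (mid + 1) (by omega) ?_).symm
        intro m h1 h2
        have hmlen : m < ss.length := by omega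
        exact ⟨hmlen, lt_of_le_of_lt (hmono m mid (by omega) (by omega)) hc⟩
      · rw [if_neg hc]
        exact ih (mid - lo) (by omega) lo mid rfl hmlo (by omega)
          (fun _ => by omega)
    · rw [if_neg hlt]
      have hlohi' : lo = hi := by omega
      rw [lSkip]
      split
      · next h =>
        exfalso
        subst hlohi'
        have := hbound h.1
        omega
      · rfl

-- once j has reached len(sizes), B's remaining iterations leave the accumulator unchanged
lemma bLoop_end (k : Int) (ss ds : List Int) (housed : Int) :
    bLoop k ss ds ss.length housed = housed := by
  induction ds with
  | nil => rfl
  | cons d rest ih =>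
    rw [bLoop]
    have hb : bis k d ss ss.length ss.length = ss.length := by
      rw [bis]; simp
    rw [hb, if_neg (lt_irrefl _)]
    exact ih

-- with 0 ≤ k, A's loop skips (via its middle branch) exactly the apartments lSkip skips
lemma aLoop_skip (k : Int) (ds ss : List Int) (i j : Nat) (housed : Int)
    (hk : 0 ≤ k) (hi : i < ds.length) :
    aLoop k ds ss i j housed = aLoop k ds ss i (lSkip k (ds.getD i 0) ss j) housed := by
  rw [lSkip]
  split
  · next h =>
    have hs : ss.getD j 0 < ds.getD i 0 - k := h.2
    rw [aLoop]
    rw [dif_pos ⟨hi, h.1⟩]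
    have hnm : ¬ |ss.getD j 0 - ds.getD i 0| ≤ k := by
      rw [abs_le]; omega
    rw [if_neg hnm, if_pos (by omega)]
    exact aLoop_skip k ds ss i (j + 1) housed hk hi
  · rfl
termination_by ss.length - j
decreasing_by omega

-- k < 0: A's loop never matches, so it returns its accumulator unchanged
lemma aLoop_neg (k : Int) (ds ss : List Int) (i j : Nat) (housed : Int) (hk : k < 0) :
    aLoop k ds ss i j housed = housed := by
  rw [aLoop]
  split
  · next h =>
    have hnm : ¬ |ss.getD j 0 - ds.getD i 0| ≤ k := by
      have := abs_nonneg (ss.getD j 0 - ds.getD i 0); omega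
    rw [if_neg hnm]
    split
    · exact aLoop_neg k ds ss i (j + 1) housed hk
    · exact aLoop_neg k ds ss (i + 1) j housed hk
  · rfl
termination_by (ds.length - i) + (ss.length - j)
decreasing_by all_goals omega

-- k < 0: B's acceptance test d - k ≤ s ≤ d + k is unsatisfiable on the sorted list
lemma bLoop_neg (k : Int) (ss ds : List Int) (j : Nat) (housed : Int) (hk : k < 0)
    (hmono : ∀ p q : Nat, p ≤ q → q < ss.length → ss.getD p 0 ≤ ss.getD q 0)
    (hj : j ≤ ss.length) :
    bLoop k ss ds j housed = housed := by
  induction ds generalizing j housed with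
  | nil => rfl
  | cons d rest ih =>
    rw [bLoop]
    rw [bis_eq_lSkip k d ss hmono j ss.length hj (le_refl _) (fun h => absurd h (lt_irrefl _))]
    split
    · next h =>
      have hge := lSkip_stop k d ss j h
      have hno : ¬ ss.getD (lSkip k d ss j) 0 ≤ d + k := by omega
      rw [if_neg hno]
      exact ih _ _ (lSkip_le k d ss j hj)
    · exact ih _ _ (lSkip_le k d ss j hj)

-- main induction (0 ≤ k): A's loop from (i, j) equals B's loop on the remaining applicants
lemma main_equiv (k : Int) (ds ss : List Int) (hk : 0 ≤ k)
    (hmono : ∀ p q : Nat, p ≤ q → q < ss.length → ss.getD p 0 ≤ ss.getD q 0) :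
    ∀ n i j housed, ds.length - i = n → j ≤ ss.length →
      aLoop k ds ss i j housed = bLoop k ss (ds.drop i) j housed := by
  intro n
  induction n with
  | zero =>
    intro i j housed hn hj
    have hi : ds.length ≤ i := by omega
    rw [List.drop_eq_nil_of_le hi, aLoop, dif_neg (by omega), bLoop]
  | succ n ih =>
    intro i j housed hn hj
    have hi : i < ds.length := by omega
    rw [List.drop_eq_getElem_cons hi]
    rw [aLoop_skip k ds ss i j housed hk hi]
    have hd : ds[i] = ds.getD i 0 := (List.getD_eq_getElem ds 0 hi).symm
    rw [bLoop, hd]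
    rw [bis_eq_lSkip k (ds.getD i 0) ss hmono j ss.length hj (le_refl _)
        (fun h => absurd h (lt_irrefl _))]
    set j' := lSkip k (ds.getD i 0) ss j with hj'
    have hjle : j' ≤ ss.length := lSkip_le _ _ _ _ hj
    by_cases hlt : j' < ss.length
    · rw [if_pos hlt]
      have hge : ds.getD i 0 - k ≤ ss.getD j' 0 := lSkip_stop k (ds.getD i 0) ss j hlt
      by_cases hacc : ss.getD j' 0 ≤ ds.getD i 0 + k
      · rw [if_pos hacc]
        rw [aLoop, dif_pos ⟨hi, hlt⟩]
        have hm : |ss.getD j' 0 - ds.getD i 0| ≤ k := by rw [abs_le]; omega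
        rw [if_pos hm]
        exact ih (i + 1) (j' + 1) (housed + 1) (by omega) (by omega)
      · rw [if_neg hacc]
        rw [aLoop, dif_pos ⟨hi, hlt⟩]
        have hm : ¬ |ss.getD j' 0 - ds.getD i 0| ≤ k := by rw [abs_le]; omega
        rw [if_neg hm, if_neg (by omega)]
        exact ih (i + 1) j' housed (by omega) hjle
    · rw [if_neg hlt]
      have hje : j' = ss.length := by omega
      rw [aLoop, dif_neg (by omega), hje]
      exact (bLoop_end k ss _ housed).symm

-- the sorted sizes list is monotone under getD on valid indices
lemma sorted_mono (sizes : List Int) :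
    ∀ p q : Nat, p ≤ q → q < (PySem.List.sorted sizes (fun x => x) false).length →
      (PySem.List.sorted sizes (fun x => x) false).getD p 0 ≤
      (PySem.List.sorted sizes (fun x => x) false).getD q 0 := by
  intro p q hpq hq
  have hp : p < (PySem.List.sorted sizes (fun x => x) false).length := by omega
  rw [List.getD_eq_getElem _ 0 hp, List.getD_eq_getElem _ 0 hq]
  exact PySem.List.sorted_id_getElem_mono sizes hpq hq

-- ===== VERDICT (by name: the statement is the Claim_ definition above) =====
theorem apartments_spec : Claim_equal_apartments := by
  intro k desired_sizes sizes _
  unfold Spec_apartments apartments apartments_alt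
  set ds := PySem.List.sorted desired_sizes (fun x => x) false
  set ss := PySem.List.sorted sizes (fun x => x) false
  have hmono := sorted_mono sizes
  rcases lt_or_ge k 0 with hk | hk
  · rw [aLoop_neg k ds ss 0 0 0 hk, bLoop_neg k ss ds 0 0 hk hmono (Nat.zero_le _)]
  · have := main_equiv k ds ss hk hmono (ds.length - 0) 0 0 0 rfl (Nat.zero_le _)
    simpa using this
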